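-- pv_equiv track=rewrite | github.com/1173249/Lit | contextlibs/contextarray.py | formPattern
-- ===== SOURCE A (Python) =====
-- def formPattern(search_array, startX, startY):
--     max_x = 0;
--     min_x = 1000;
--     max_y = 0;
--     min_y = 1000;
--     for p in search_array:
--         max_x = max(max_x, p[0])
--         min_x = min(min_x, p[0])
--         max_y = max(max_y, p[1])
--         min_y = min(min_y, p[1])
--
--     axis_x = (max_x - min_x) + 1
--     axis_y = (max_y - min_y) + 1
--     result = [['0'] * axis_x for row in range(axis_y)]
--     #print result
--     for p in search_array:
--         #print p[0] - min_x
--         #print p[1] - min_y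
--         result[p[1] - min_y][p[0] - min_x] = '1'
--     #print result
--     #print startX-min_x, startY-min_y
--     return result, startY-min_y, startX-min_x
-- ===== SOURCE B (Python) =====
-- def formPattern(search_array, startX, startY):
--     xs = [p[0] for p in search_array]
--     ys = [p[1] for p in search_array]
--     # sentinel-preserving bounds: max starts at 0, min at 1000, as in the original
--     max_x = max([0] + xs)
--     min_x = min([1000] + xs)
--     max_y = max([0] + ys)
--     min_y = min([1000] + ys)
--     pts = {(p[0], p[1]) for p in search_array}
--     result = [['1' if (x + min_x, y + min_y) in pts else '0'
--                for x in range(max_x - min_x + 1)]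
--               for y in range(max_y - min_y + 1)]
--     return result, startY - min_y, startX - min_x
-- ===== Notes on version B (the rewrite author's own statement) =====
-- stated objective: alternative
-- what changed: B replaces the allocate-zeros-then-mutate grid construction by a set of point tuples plus a nested comprehension that renders every cell by membership test (bounds computed as plain min/max over sentinel-extended coordinate lists instead of a four-accumulator loop).
import Mathlib
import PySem

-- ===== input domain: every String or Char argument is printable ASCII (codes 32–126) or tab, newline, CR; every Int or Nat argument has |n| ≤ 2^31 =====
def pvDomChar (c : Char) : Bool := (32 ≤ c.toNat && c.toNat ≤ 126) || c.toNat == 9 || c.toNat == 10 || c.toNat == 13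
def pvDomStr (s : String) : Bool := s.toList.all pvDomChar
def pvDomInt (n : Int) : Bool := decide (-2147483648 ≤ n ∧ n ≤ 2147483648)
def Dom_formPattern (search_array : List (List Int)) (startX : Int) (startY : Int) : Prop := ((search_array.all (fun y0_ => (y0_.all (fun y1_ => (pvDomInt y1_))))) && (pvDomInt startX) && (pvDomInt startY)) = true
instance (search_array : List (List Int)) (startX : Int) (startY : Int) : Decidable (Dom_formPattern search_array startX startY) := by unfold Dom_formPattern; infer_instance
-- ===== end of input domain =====

-- B rebuilds the grid by per-cell point-set membership instead of A's zero-grid mutation (objective: alternative).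

-- ===== PORT A =====
-- p[0] / p[1]; the default 0 is never used on Pre_ (every point list has length ≥ 2)
def pvPx (p : List Int) : Int := PySem.List.pyGetD p 0 0
def pvPy (p : List Int) : Int := PySem.List.pyGetD p 1 0

def formPattern (search_array : List (List Int)) (startX : Int) (startY : Int) :
    List (List String) × Int × Int :=
  -- A's first loop: the four max/min accumulators threaded as one 4-tuple
  let b := search_array.foldl
    (fun (st : Int × Int × Int × Int) p =>
      (max st.1 (pvPx p), min st.2.1 (pvPx p), max st.2.2.1 (pvPy p), min st.2.2.2 (pvPy p)))
    (0, 1000, 0, 1000)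
  let axis_x : Int := (b.1 - b.2.1) + 1
  let axis_y : Int := (b.2.2.1 - b.2.2.2) + 1
  -- ['0'] * axis_x and range(axis_y): a negative count gives the empty list (Int.toNat clamps to 0)
  let init := List.replicate axis_y.toNat (List.replicate axis_x.toNat "0")
  -- result[p[1]-min_y][p[0]-min_x] = '1'; on Pre_ both indices are nonnegative and in range
  let result := search_array.foldl
    (fun g p => g.modify (pvPy p - b.2.2.2).toNat (fun row => row.set (pvPx p - b.2.1).toNat "1"))
    init
  (result, startY - b.2.2.2, startX - b.2.1)

-- ===== PORT B =====
def formPattern_alt (search_array : List (List Int)) (startX : Int) (startY : Int) :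
    List (List String) × Int × Int :=
  let xs := search_array.map pvPx
  let ys := search_array.map pvPy
  -- max([0]+xs) = left fold of max from 0 (Python's max on a nonempty int list); likewise min([1000]+xs)
  let max_x := xs.foldl max 0
  let min_x := xs.foldl min 1000
  let max_y := ys.foldl max 0
  let min_y := ys.foldl min 1000
  let pts : PySem.Set (Int × Int) :=
    PySem.Set.ofList (search_array.map (fun p => (pvPx p, pvPy p)))
  let result := (List.range (max_y - min_y + 1).toNat).map (fun (y : Nat) =>
    (List.range (max_x - min_x + 1).toNat).map (fun (x : Nat) =>
      if PySem.Set.contains pts ((x : Int) + min_x, (y : Int) + min_y) then "1" else "0"))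
  (result, startY - min_y, startX - min_x)

-- ===== PRECONDITION & SPEC =====
-- Pre_ excludes point lists shorter than 2, on which Python A raises IndexError at p[0] or p[1].
def Pre_formPattern (search_array : List (List Int)) (startX : Int) (startY : Int) : Prop :=
  ∀ p ∈ search_array, 2 ≤ p.length
instance (search_array : List (List Int)) (startX : Int) (startY : Int) : Decidable (Pre_formPattern search_array startX startY) := by unfold Pre_formPattern; infer_instance

def pvWitness_formPattern : List (List Int) × Int × Int := ([[2, 3], [4, 3]], 2, 3)

def Spec_formPattern (search_array : List (List Int)) (startX : Int) (startY : Int) (out : List (List String) × Int × Int) : Prop := out = formPattern_alt search_array startX startY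
instance (search_array : List (List Int)) (startX : Int) (startY : Int) (out : List (List String) × Int × Int) : Decidable (Spec_formPattern search_array startX startY out) := by unfold Spec_formPattern; infer_instance

-- ===== CLAIM (what is proved, stated in full; the proofs are below) =====
def Claim_equal_formPattern : Prop := ∀ (search_array : List (List Int)) (startX : Int) (startY : Int), Dom_formPattern search_array startX startY → Pre_formPattern search_array startX startY → Spec_formPattern search_array startX startY (formPattern search_array startX startY)

-- ===== LEMMAS AND PROOFS =====

-- the 4-tuple fold of A splits into four independent folds
theorem pvFold4_eq (l : List (List Int)) (a b c d : Int) :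
    l.foldl
      (fun (st : Int × Int × Int × Int) p =>
        (max st.1 (pvPx p), min st.2.1 (pvPx p), max st.2.2.1 (pvPy p), min st.2.2.2 (pvPy p)))
      (a, b, c, d)
    = (l.foldl (fun m p => max m (pvPx p)) a, l.foldl (fun m p => min m (pvPx p)) b,
       l.foldl (fun m p => max m (pvPy p)) c, l.foldl (fun m p => min m (pvPy p)) d) := by
  induction l generalizing a b c d with
  | nil => rfl
  | cons h t ih => simp only [List.foldl_cons]; exact ih _ _ _ _

theorem pvFoldMin_le_init (f : List Int → Int) (l : List (List Int)) (a : Int) :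
    l.foldl (fun m q => min m (f q)) a ≤ a := by
  induction l generalizing a with
  | nil => exact le_refl _
  | cons h t ih => exact le_trans (ih (min a (f h))) (min_le_left _ _)

theorem pvFoldMin_le (f : List Int → Int) (l : List (List Int)) (a : Int) :
    ∀ p ∈ l, l.foldl (fun m q => min m (f q)) a ≤ f p := by
  induction l generalizing a with
  | nil => intro p hp; cases hp
  | cons h t ih =>
    intro p hp
    rcases List.mem_cons.mp hp with rfl | hp
    · exact le_trans (pvFoldMin_le_init f t (min a (f p))) (min_le_right _ _)
    · exact ih _ p hp

theorem pvLe_foldMax_init (f : List Int → Int) (l : List (List Int)) (a : Int) :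
    a ≤ l.foldl (fun m q => max m (f q)) a := by
  induction l generalizing a with
  | nil => exact le_refl _
  | cons h t ih => exact le_trans (le_max_left _ _) (ih (max a (f h)))

theorem pvLe_foldMax (f : List Int → Int) (l : List (List Int)) (a : Int) :
    ∀ p ∈ l, f p ≤ l.foldl (fun m q => max m (f q)) a := by
  induction l generalizing a with
  | nil => intro p hp; cases hp
  | cons h t ih =>
    intro p hp
    rcases List.mem_cons.mp hp with rfl | hp
    · exact le_trans (le_max_right _ _) (pvLe_foldMax_init f t (max a (f p)))
    · exact ih _ p hp

def pvCell (g : List (List String)) (y x : Nat) : String := (g.getD y []).getD x ""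

-- invariant of A's marking loop: dimensions are preserved and a cell is "1"
-- exactly when some point of the processed list maps there
theorem pvMark_invariant (mnx mny : Int) (ay ax : Nat) :
    ∀ (l : List (List Int)) (g : List (List String)),
    g.length = ay → (∀ r ∈ g, r.length = ax) →
    (∀ p ∈ l, (pvPy p - mny).toNat < ay ∧ (pvPx p - mnx).toNat < ax) →
    (let out := l.foldl
        (fun g p => g.modify (pvPy p - mny).toNat (fun row => row.set (pvPx p - mnx).toNat "1")) g
     out.length = ay ∧ (∀ r ∈ out, r.length = ax) ∧
     ∀ y x, pvCell out y x =
       if ∃ p ∈ l, (pvPy p - mny).toNat = y ∧ (pvPx p - mnx).toNat = x then "1"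
       else pvCell g y x) := by
  intro l
  induction l with
  | nil =>
    intro g hlen hrow _
    refine ⟨hlen, hrow, ?_⟩
    intro y x
    simp
  | cons p t ih =>
    intro g hlen hrow hin
    have hip : (pvPy p - mny).toNat < ay ∧ (pvPx p - mnx).toNat < ax := hin p (List.mem_cons_self ..)
    have hlen' : (g.modify (pvPy p - mny).toNat (fun row => row.set (pvPx p - mnx).toNat "1")).length = ay := by
      rw [List.length_modify]; exact hlen
    have hrow' : ∀ r ∈ g.modify (pvPy p - mny).toNat (fun row => row.set (pvPx p - mnx).toNat "1"),
        r.length = ax := by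
      intro r hr
      rcases List.mem_iff_getElem?.mp hr with ⟨k, hk⟩
      rw [List.getElem?_modify] at hk
      rcases Option.map_eq_some_iff.mp hk with ⟨a, ha, hr2⟩
      have hal := hrow a (List.mem_of_getElem? ha)
      by_cases hik : (pvPy p - mny).toNat = k
      · rw [if_pos hik] at hr2; rw [← hr2, List.length_set]; exact hal
      · rw [if_neg hik] at hr2; rw [← hr2]; exact hal
    have hin' : ∀ q ∈ t, (pvPy q - mny).toNat < ay ∧ (pvPx q - mnx).toNat < ax :=
      fun q hq => hin q (List.mem_cons_of_mem _ hq)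
    have IH := ih (g.modify (pvPy p - mny).toNat (fun row => row.set (pvPx p - mnx).toNat "1"))
      hlen' hrow' hin'
    simp only at IH ⊢
    rw [List.foldl_cons]
    refine ⟨IH.1, IH.2.1, ?_⟩
    intro y x
    rw [IH.2.2 y x]
    by_cases h1 : ∃ q ∈ t, (pvPy q - mny).toNat = y ∧ (pvPx q - mnx).toNat = x
    · rcases h1 with ⟨q, hq, hqy⟩
      rw [if_pos ⟨q, hq, hqy⟩, if_pos ⟨q, List.mem_cons_of_mem _ hq, hqy⟩]
    · rw [if_neg h1]
      by_cases h2y : (pvPy p - mny).toNat = y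
      · by_cases h2x : (pvPx p - mnx).toNat = x
        · rw [if_pos ⟨p, List.mem_cons_self .., h2y, h2x⟩]
          have hiy : (pvPy p - mny).toNat < g.length := by rw [hlen]; exact hip.1
          have hrowlen : g[(pvPy p - mny).toNat].length = ax := hrow _ (List.getElem_mem hiy)
          have hjx : (pvPx p - mnx).toNat < g[(pvPy p - mny).toNat].length := by
            rw [hrowlen]; exact hip.2
          subst h2y
          subst h2x
          simp [pvCell, List.getD_eq_getElem?_getD, List.getElem?_modify,
            List.getElem?_eq_getElem hiy, List.getElem?_set, hjx]
        · have hcond : ¬ ∃ q ∈ p :: t, (pvPy q - mny).toNat = y ∧ (pvPx q - mnx).toNat = x := by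
            rintro ⟨q, hq, hqy⟩
            rcases List.mem_cons.mp hq with rfl | hq
            · exact h2x hqy.2
            · exact h1 ⟨q, hq, hqy⟩
          rw [if_neg hcond]
          subst h2y
          simp only [pvCell, List.getD_eq_getElem?_getD, List.getElem?_modify]
          cases hgy : g[(pvPy p - mny).toNat]? with
          | none => simp
          | some row => simp [List.getElem?_set, h2x]
      · have hcond : ¬ ∃ q ∈ p :: t, (pvPy q - mny).toNat = y ∧ (pvPx q - mnx).toNat = x := by
          rintro ⟨q, hq, hqy⟩
          rcases List.mem_cons.mp hq with rfl | hq
          · exact h2y hqy.1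
          · exact h1 ⟨q, hq, hqy⟩
        rw [if_neg hcond]
        simp [pvCell, List.getD_eq_getElem?_getD, List.getElem?_modify, if_neg h2y]

-- two grids with equal dimensions and equal cells are equal
theorem pvGrid_ext (a b : List (List String)) (ha : a.length = b.length)
    (hr : ∀ y, (a.getD y []).length = (b.getD y []).length)
    (hc : ∀ y x, pvCell a y x = pvCell b y x) : a = b := by
  apply List.ext_getElem ha
  intro y hy1 hy2
  have hrl : a[y].length = b[y].length := by
    have := hr y
    simpa [List.getD_eq_getElem?_getD, List.getElem?_eq_getElem, hy1, hy2] using this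
  apply List.ext_getElem hrl
  intro x hx1 hx2
  have := hc y x
  simpa [pvCell, List.getD_eq_getElem?_getD, List.getElem?_eq_getElem, hy1, hy2, hx1, hx2] using this

theorem pvCellB (mnx mny : Int) (pts : PySem.Set (Int × Int)) (ay ax y x : Nat)
    (hy : y < ay) (hx : x < ax) :
    pvCell ((List.range ay).map (fun (y : Nat) => (List.range ax).map (fun (x : Nat) =>
      if PySem.Set.contains pts ((x : Int) + mnx, (y : Int) + mny) then "1" else "0"))) y x
    = (if PySem.Set.contains pts ((x : Int) + mnx, (y : Int) + mny) then "1" else "0") := by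
  simp only [pvCell, List.getD_eq_getElem?_getD, List.getElem?_map, List.getElem?_range hy,
    List.getElem?_range hx, Option.map_some, Option.getD_some]

-- the marked grid of A equals the membership-rendered grid of B
theorem pvGrid_eq (l : List (List Int)) (mnx mny mx my : Int)
    (hbnd : ∀ p ∈ l, mnx ≤ pvPx p ∧ pvPx p ≤ mx ∧ mny ≤ pvPy p ∧ pvPy p ≤ my) :
    l.foldl (fun g p => g.modify (pvPy p - mny).toNat (fun row => row.set (pvPx p - mnx).toNat "1"))
      (List.replicate ((my - mny) + 1).toNat (List.replicate ((mx - mnx) + 1).toNat "0"))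
    = (List.range ((my - mny) + 1).toNat).map (fun (y : Nat) =>
        (List.range ((mx - mnx) + 1).toNat).map (fun (x : Nat) =>
          if PySem.Set.contains (PySem.Set.ofList (l.map fun p => (pvPx p, pvPy p)))
            ((x : Int) + mnx, (y : Int) + mny) then "1" else "0")) := by
  set ax := ((mx - mnx) + 1).toNat with hax
  set ay := ((my - mny) + 1).toNat with hay
  have hin : ∀ p ∈ l, (pvPy p - mny).toNat < ay ∧ (pvPx p - mnx).toNat < ax := by
    intro p hp
    have h := hbnd p hp
    constructor <;> omega
  have INV := pvMark_invariant mnx mny ay ax l (List.replicate ay (List.replicate ax "0"))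
    (by simp) (by intro r hr; rw [List.eq_of_mem_replicate hr]; simp) hin
  simp only at INV
  -- the x,y-membership seen as membership of the mapped point list
  have hiff : ∀ (y x : Nat),
      (∃ p ∈ l, (pvPy p - mny).toNat = y ∧ (pvPx p - mnx).toNat = x) ↔
      ((x : Int) + mnx, (y : Int) + mny) ∈ l.map (fun p => (pvPx p, pvPy p)) := by
    intro y x
    rw [List.mem_map]
    constructor
    · rintro ⟨p, hp, h1, h2⟩
      have h := hbnd p hp
      refine ⟨p, hp, ?_⟩
      rw [Prod.mk.injEq]
      constructor <;> omega
    · rintro ⟨p, hp, hpe⟩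
      rw [Prod.mk.injEq] at hpe
      have h := hbnd p hp
      exact ⟨p, hp, by omega, by omega⟩
  have hcont : ∀ (z : Int × Int),
      (PySem.Set.contains (PySem.Set.ofList (l.map fun p => (pvPx p, pvPy p))) z = true) ↔
      z ∈ l.map (fun p => (pvPx p, pvPy p)) :=
    fun z => (PySem.Set.contains_iff _ _).trans (PySem.Set.mem_ofList _ z)
  apply pvGrid_ext
  · rw [INV.1]; simp
  · intro y
    by_cases hy : y < ay
    · have hlenA : (List.foldl (fun g p =>
          g.modify (pvPy p - mny).toNat fun row => row.set (pvPx p - mnx).toNat "1")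
          (List.replicate ay (List.replicate ax "0")) l).length = ay := INV.1
      have hy' : y < (List.foldl (fun g p =>
          g.modify (pvPy p - mny).toNat fun row => row.set (pvPx p - mnx).toNat "1")
          (List.replicate ay (List.replicate ax "0")) l).length := by rw [hlenA]; exact hy
      simp only [List.getD_eq_getElem?_getD, List.getElem?_eq_getElem hy', List.getElem?_map,
        List.getElem?_range hy, Option.map_some, Option.getD_some, List.length_map,
        List.length_range]
      exact INV.2.1 _ (List.getElem_mem hy')
    · rw [List.getD_eq_default _ _ (by rw [INV.1]; omega),
        List.getD_eq_default _ _ (by simp; omega)]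
  · intro y x
    rw [INV.2.2 y x]
    by_cases hy : y < ay
    · by_cases hx : x < ax
      · rw [pvCellB mnx mny _ ay ax y x hy hx]
        by_cases hmem : ∃ p ∈ l, (pvPy p - mny).toNat = y ∧ (pvPx p - mnx).toNat = x
        · rw [if_pos hmem]
          have : PySem.Set.contains (PySem.Set.ofList (l.map fun p => (pvPx p, pvPy p)))
              ((x : Int) + mnx, (y : Int) + mny) = true := (hcont _).mpr ((hiff y x).mp hmem)
          rw [this]; rfl
        · rw [if_neg hmem]
          have : ¬ (PySem.Set.contains (PySem.Set.ofList (l.map fun p => (pvPx p, pvPy p)))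
              ((x : Int) + mnx, (y : Int) + mny) = true) := fun h => hmem ((hiff y x).mpr ((hcont _).mp h))
          rw [Bool.not_eq_true] at this
          rw [this]
          simp [pvCell, List.getD_eq_getElem?_getD, List.getElem?_replicate, hy, hx]
      · have hne : ¬ ∃ p ∈ l, (pvPy p - mny).toNat = y ∧ (pvPx p - mnx).toNat = x := by
          rintro ⟨p, hp, h1, h2⟩
          exact hx (h2 ▸ (hin p hp).2)
        rw [if_neg hne]
        simp [pvCell, List.getD_eq_getElem?_getD, List.getElem?_range, List.getElem?_replicate,
          hy, hx, List.getD_eq_default]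
    · have hne : ¬ ∃ p ∈ l, (pvPy p - mny).toNat = y ∧ (pvPx p - mnx).toNat = x := by
        rintro ⟨p, hp, h1, h2⟩
        exact hy (h1 ▸ (hin p hp).1)
      rw [if_neg hne]
      simp [pvCell, List.getD_eq_getElem?_getD, List.getElem?_range, List.getElem?_replicate, hy]

theorem pvMain (search_array : List (List Int)) (startX startY : Int) :
    formPattern search_array startX startY = formPattern_alt search_array startX startY := by
  unfold formPattern formPattern_alt
  rw [pvFold4_eq]
  simp only [List.foldl_map]
  have hbnd : ∀ p ∈ search_array,
      search_array.foldl (fun m p => min m (pvPx p)) 1000 ≤ pvPx p ∧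
      pvPx p ≤ search_array.foldl (fun m p => max m (pvPx p)) 0 ∧
      search_array.foldl (fun m p => min m (pvPy p)) 1000 ≤ pvPy p ∧
      pvPy p ≤ search_array.foldl (fun m p => max m (pvPy p)) 0 := by
    intro p hp
    exact ⟨pvFoldMin_le pvPx search_array 1000 p hp, pvLe_foldMax pvPx search_array 0 p hp,
      pvFoldMin_le pvPy search_array 1000 p hp, pvLe_foldMax pvPy search_array 0 p hp⟩
  rw [pvGrid_eq search_array _ _ _ _ hbnd]

-- ===== VERDICT (by name: the statement is the Claim_ definition above) =====
theorem formPattern_spec : Claim_equal_formPattern := by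
  intro sa sX sY _ _
  unfold Spec_formPattern
  exact pvMain sa sX sY
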